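-- pv_equiv track=rewrite | github.com/skaizen-group/KBP | Notebooks/anntools/__init__.py | mergeAnnotations
-- ===== SOURCE A (Python) =====
-- def mergeAnnotations(data):
--     out_text = ''
--     out_ents = []
--     for doc in data:
--         l = len(out_text)
--         out_text += (doc[0]+'\n')
--         entities = doc[1]['entities']
--         for ent in entities:
--             (a,b,c) = ent
--             ent_ = (a+l, b+l, c)
--             out_ents.append(ent_)
--
--     return out_text, out_ents
-- ===== SOURCE B (Python) =====
-- def mergeAnnotations(data):
--     # prefix-offset table, then two independent passes (text join, entity shift)
--     lengths = [len(doc[0]) + 1 for doc in data]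
--     prefixes = []
--     p = 0
--     for L in lengths:
--         prefixes.append(p)
--         p += L
--     out_text = ''.join(doc[0] + '\n' for doc in data)
--     out_ents = [(a + q, b + q, c)
--                 for doc, q in zip(data, prefixes)
--                 for (a, b, c) in doc[1]['entities']]
--     return out_text, out_ents
-- ===== Notes on version B (the rewrite author's own statement) =====
-- stated objective: alternative
-- what changed: Replaced the single interleaved running-offset accumulator loop by a precomputed prefix-offset table plus two independent passes (a join for the text, a zip/flatten comprehension for the shifted entities).
import Mathlib
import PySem

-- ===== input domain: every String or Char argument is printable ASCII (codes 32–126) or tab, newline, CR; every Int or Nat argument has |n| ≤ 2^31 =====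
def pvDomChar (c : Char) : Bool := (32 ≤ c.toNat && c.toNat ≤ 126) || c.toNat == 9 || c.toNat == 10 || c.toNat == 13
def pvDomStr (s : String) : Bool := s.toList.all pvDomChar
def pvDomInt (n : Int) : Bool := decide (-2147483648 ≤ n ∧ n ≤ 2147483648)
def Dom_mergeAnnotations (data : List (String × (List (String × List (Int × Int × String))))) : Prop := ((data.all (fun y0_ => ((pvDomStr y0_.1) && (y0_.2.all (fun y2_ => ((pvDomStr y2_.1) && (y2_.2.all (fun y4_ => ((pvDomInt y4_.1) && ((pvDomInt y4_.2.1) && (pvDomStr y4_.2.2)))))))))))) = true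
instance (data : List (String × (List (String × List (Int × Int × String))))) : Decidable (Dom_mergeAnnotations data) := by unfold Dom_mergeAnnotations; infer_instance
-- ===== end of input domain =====

-- B replaces A's interleaved running-offset loop by a prefix-offset table plus two
-- independent passes (text join, entity shift); same cost, different decomposition.


-- ===== PORT A =====
-- A's loop: state (out_text as List Char, out_ents); l = len(out_text); inner loop appends
-- shifted entities.  doc[1]['entities'] is a first-match lookup (Pre_ guarantees the key
-- exists, so the .getD [] default never fires inside Pre_).
-- loop body of A (one iteration of 'for doc in data')
def pvStepA (st : List Char × List (Int × Int × String))
    (doc : String × (List (String × List (Int × Int × String)))) :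
    List Char × List (Int × Int × String) :=
  let l : Int := st.1.length
  let out_text := st.1 ++ (doc.1.toList ++ ['\n'])
  let entities := (doc.2.lookup "entities").getD []
  let out_ents := entities.foldl
    (fun es ent => es ++ [(ent.1 + l, ent.2.1 + l, ent.2.2)]) st.2
  (out_text, out_ents)

def mergeAnnotations (data : List (String × (List (String × List (Int × Int × String))))) : String × (List (Int × Int × String)) :=
  let st := data.foldl pvStepA ([], [])
  (String.mk st.1, st.2)

-- ===== PORT B =====
-- prefixes = []; p = 0; for L in lengths: prefixes.append(p); p += L
def pvPrefixFold (lengths : List Int) : List Int × Int :=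
  lengths.foldl (fun (s : List Int × Int) L => (s.1 ++ [s.2], s.2 + L)) ([], 0)

def mergeAnnotations_alt (data : List (String × (List (String × List (Int × Int × String))))) : String × (List (Int × Int × String)) :=
  let lengths : List Int := data.map (fun doc => (doc.1.toList.length : Int) + 1)
  let prefixes := (pvPrefixFold lengths).1
  let out_text := String.mk ((data.map (fun doc => doc.1.toList ++ ['\n'])).flatten)
  let out_ents := (data.zip prefixes).flatMap
    (fun dq => ((dq.1.2.lookup "entities").getD []).map
      (fun e => (e.1 + dq.2, e.2.1 + dq.2, e.2.2)))
  (out_text, out_ents)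

-- ===== PRECONDITION & SPEC =====
-- Pre_ excludes exactly the inputs where some doc's dict lacks the key "entities",
-- on which the Python A raises KeyError (B raises there too).
def Pre_mergeAnnotations (data : List (String × (List (String × List (Int × Int × String))))) : Prop :=
  ∀ doc ∈ data, "entities" ∈ doc.2.map (·.1)
instance (data : List (String × (List (String × List (Int × Int × String))))) : Decidable (Pre_mergeAnnotations data) := by unfold Pre_mergeAnnotations; infer_instance
def pvWitness_mergeAnnotations : (List (String × (List (String × List (Int × Int × String))))) :=
  [("ab", [("entities", [(0, 2, "W")])]), ("c", [("entities", [(0, 1, "X")])])]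
def Spec_mergeAnnotations (data : List (String × (List (String × List (Int × Int × String))))) (out : String × (List (Int × Int × String))) : Prop := out = mergeAnnotations_alt data
instance (data : List (String × (List (String × List (Int × Int × String))))) (out : String × (List (Int × Int × String))) : Decidable (Spec_mergeAnnotations data out) := by unfold Spec_mergeAnnotations; infer_instance

-- ===== CLAIM (what is proved, stated in full; the proofs are below) =====
def Claim_equal_mergeAnnotations : Prop := ∀ (data : List (String × (List (String × List (Int × Int × String))))), Dom_mergeAnnotations data → Pre_mergeAnnotations data → Spec_mergeAnnotations data (mergeAnnotations data)

-- ===== LEMMAS AND PROOFS =====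

-- canonical forms used to meet in the middle
def pvText (data : List (String × (List (String × List (Int × Int × String))))) : List Char :=
  (data.map (fun doc => doc.1.toList ++ ['\n'])).flatten

def pvEnts (data : List (String × (List (String × List (Int × Int × String))))) (p : Int) : List (Int × Int × String) :=
  match data with
  | [] => []
  | doc :: rest =>
    ((doc.2.lookup "entities").getD []).map (fun e => (e.1 + p, e.2.1 + p, e.2.2))
      ++ pvEnts rest (p + (doc.1.toList.length + 1))

def pvSums (lengths : List Int) (p : Int) : List Int :=
  match lengths with
  | [] => []
  | L :: ls => p :: pvSums ls (p + L)

lemma pvPrefixFold_go (lengths : List Int) (acc : List Int) (p : Int) :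
    (lengths.foldl (fun (s : List Int × Int) L => (s.1 ++ [s.2], s.2 + L)) (acc, p)).1
      = acc ++ pvSums lengths p := by
  induction lengths generalizing acc p with
  | nil => simp [pvSums]
  | cons L ls ih => simp [List.foldl, pvSums, ih]

lemma pvZip_sums (data : List (String × (List (String × List (Int × Int × String))))) (p : Int) :
    (data.zip (pvSums (data.map (fun doc => (doc.1.toList.length : Int) + 1)) p)).flatMap
      (fun dq => ((dq.1.2.lookup "entities").getD []).map
        (fun e => (e.1 + dq.2, e.2.1 + dq.2, e.2.2)))
      = pvEnts data p := by
  induction data generalizing p with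
  | nil => simp [pvSums, pvEnts]
  | cons doc rest ih =>
    simp only [List.map_cons, pvSums, List.zip_cons_cons, List.flatMap_cons, pvEnts, ih]

lemma pvA_fold (data : List (String × (List (String × List (Int × Int × String)))))
    (cs : List Char) (es : List (Int × Int × String)) :
    data.foldl pvStepA (cs, es)
      = (cs ++ pvText data, es ++ pvEnts data cs.length) := by
  induction data generalizing cs es with
  | nil => simp [pvText, pvEnts]
  | cons doc rest ih =>
    rw [List.foldl_cons]
    simp only [pvStepA, PySem.List.foldl_append_singleton_eq_map]
    rw [ih]
    have h : (((cs ++ (doc.1.toList ++ ['\n'])).length : Nat) : Int)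
        = (cs.length : Int) + ((doc.1.toList.length : Int) + 1) := by
      rw [List.length_append, List.length_append, List.length_singleton]
      push_cast
      ring
    rw [h]
    simp [pvText, pvEnts, List.append_assoc]

-- ===== VERDICT (by name: the statement is the Claim_ definition above) =====
theorem mergeAnnotations_spec : Claim_equal_mergeAnnotations := by
  intro data _ _
  show mergeAnnotations data = mergeAnnotations_alt data
  simp only [mergeAnnotations, mergeAnnotations_alt, pvPrefixFold, pvA_fold, pvPrefixFold_go,
    pvZip_sums, List.nil_append]
  simp [pvText]
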